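-- pv_equiv track=rewrite | github.com/jgadelugo/einsteinBot | exploration/gap_detector.py | _topics_are_related
-- ===== SOURCE A (Python) =====
-- from typing import Dict, List, Optional, Set, Tuple, Union, Any
--
-- def _topics_are_related(topics1: Set[str], topics2: Set[str]) -> bool:
--     """Check if two sets of topics are conceptually related."""
--
--     # Define related topic groups
--     related_groups = [
--         {"algebra", "polynomial", "quadratic"},
--         {"calculus", "derivative", "integral", "limits"},
--         {"trigonometry", "periodic", "sine", "cosine"},
--         {"geometry", "circle", "triangle", "area"},
--         {"complex_analysis", "complex", "euler"},
--         {"statistics", "probability", "distribution"}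
--     ]
--
--     for group in related_groups:
--         if (topics1 & group) and (topics2 & group):
--             return True
--
--     return False
-- ===== SOURCE B (Python) =====
-- def _topics_are_related(topics1, topics2):
--     """Check if two sets of topics are conceptually related."""
--     groups = [
--         ["algebra", "polynomial", "quadratic"],
--         ["calculus", "derivative", "integral", "limits"],
--         ["trigonometry", "periodic", "sine", "cosine"],
--         ["geometry", "circle", "triangle", "area"],
--         ["complex_analysis", "complex", "euler"],
--         ["statistics", "probability", "distribution"],
--     ]
--     # Inverted index: word -> id of the (unique) group containing it
--     index = {}
--     for gid, group in enumerate(groups):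
--         for word in group:
--             index[word] = gid
--     ids1 = {index[t] for t in topics1 if t in index}
--     ids2 = {index[t] for t in topics2 if t in index}
--     return not ids1.isdisjoint(ids2)
-- ===== Notes on version B (the rewrite author's own statement) =====
-- stated objective: alternative
-- what changed: B replaces A's loop over the six concept groups (intersecting each with both topic sets) by an inverted index word->group-id built once; it then maps each topic list to the set of group ids it hits and returns whether those two id sets intersect.
import Mathlib
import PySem

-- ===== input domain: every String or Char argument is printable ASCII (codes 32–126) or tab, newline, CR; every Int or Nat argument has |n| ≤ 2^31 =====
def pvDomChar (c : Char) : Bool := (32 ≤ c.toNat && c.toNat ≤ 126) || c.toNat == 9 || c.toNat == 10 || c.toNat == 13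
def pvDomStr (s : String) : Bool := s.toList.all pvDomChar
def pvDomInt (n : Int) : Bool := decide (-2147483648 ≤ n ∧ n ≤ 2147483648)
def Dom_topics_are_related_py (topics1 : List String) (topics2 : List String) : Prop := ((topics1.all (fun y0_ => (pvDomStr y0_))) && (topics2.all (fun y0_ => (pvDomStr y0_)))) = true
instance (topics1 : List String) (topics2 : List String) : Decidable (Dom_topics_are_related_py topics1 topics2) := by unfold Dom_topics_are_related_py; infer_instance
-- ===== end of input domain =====

-- B replaces A's loop over the six concept groups by an inverted index word -> group id,
-- looping over the topic words instead; both are total and agree on every input.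

-- ===== PORT A =====
-- the six related-topic groups, as Python set literals
def pvGroupsA : List (PySem.Set String) :=
  [ PySem.Set.ofList ["algebra", "polynomial", "quadratic"],
    PySem.Set.ofList ["calculus", "derivative", "integral", "limits"],
    PySem.Set.ofList ["trigonometry", "periodic", "sine", "cosine"],
    PySem.Set.ofList ["geometry", "circle", "triangle", "area"],
    PySem.Set.ofList ["complex_analysis", "complex", "euler"],
    PySem.Set.ofList ["statistics", "probability", "distribution"] ]

-- A's 'for group in related_groups: if (topics1 & group) and (topics2 & group): return True'
def pvLoopA (topics1 : List String) (topics2 : List String) : List (PySem.Set String) → Bool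
  | [] => false
  | g :: gs =>
      if !(PySem.Set.inter (PySem.Set.ofList topics1) g).isEmpty
         && !(PySem.Set.inter (PySem.Set.ofList topics2) g).isEmpty then true
      else pvLoopA topics1 topics2 gs

def topics_are_related_py (topics1 : List String) (topics2 : List String) : Bool :=
  pvLoopA topics1 topics2 pvGroupsA

-- ===== PORT B =====
def pvGroupsB : List (List String) :=
  [ ["algebra", "polynomial", "quadratic"],
    ["calculus", "derivative", "integral", "limits"],
    ["trigonometry", "periodic", "sine", "cosine"],
    ["geometry", "circle", "triangle", "area"],
    ["complex_analysis", "complex", "euler"],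
    ["statistics", "probability", "distribution"] ]

-- inverted index word -> group id, built by B's nested 'for gid, group / for word' loops
def pvIndexB : PySem.Dict String Int :=
  (PySem.List.enumerate pvGroupsB).foldl
    (fun d p => p.2.foldl (fun d w => d.insert w p.1) d) PySem.Dict.empty

def topics_are_related_py_alt (topics1 : List String) (topics2 : List String) : Bool :=
  let ids1 : PySem.Set Int := PySem.Set.ofList (topics1.filterMap (fun t => pvIndexB.get? t))
  let ids2 : PySem.Set Int := PySem.Set.ofList (topics2.filterMap (fun t => pvIndexB.get? t))
  !(PySem.Set.isdisjoint ids1 ids2)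

-- ===== PRECONDITION & SPEC =====
def Spec_topics_are_related_py (topics1 : List String) (topics2 : List String) (out : Bool) : Prop := out = topics_are_related_py_alt topics1 topics2
instance (topics1 : List String) (topics2 : List String) (out : Bool) : Decidable (Spec_topics_are_related_py topics1 topics2 out) := by unfold Spec_topics_are_related_py; infer_instance

-- ===== CLAIM (what is proved, stated in full; the proofs are below) =====
def Claim_equal_topics_are_related_py : Prop := ∀ (topics1 : List String) (topics2 : List String), Dom_topics_are_related_py topics1 topics2 → Spec_topics_are_related_py topics1 topics2 (topics_are_related_py topics1 topics2)

-- ===== LEMMAS AND PROOFS =====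

-- the index maps every word of group k to k …
lemma pv_lookup_of_mem (k : Fin 6) (x : String) (hx : x ∈ pvGroupsB[k.1]) :
    pvIndexB.get? x = some k.1 := by
  fin_cases k <;> (fin_cases hx <;> decide)

-- … and nothing else: a successful lookup comes from some group
lemma pv_mem_of_lookup (x : String) (i : Int) (h : pvIndexB.get? x = some i) :
    ∃ k : Fin 6, i = (k.1 : Int) ∧ x ∈ pvGroupsB[k.1] := by
  have hm := PySem.Dict.mem_items_of_get?_eq_some pvIndexB h
  have hit : pvIndexB.items = [("algebra",0),("polynomial",0),("quadratic",0),("calculus",1),("derivative",1),("integral",1),("limits",1),("trigonometry",2),("periodic",2),("sine",2),("cosine",2),("geometry",3),("circle",3),("triangle",3),("area",3),("complex_analysis",4),("complex",4),("euler",4),("statistics",5),("probability",5),("distribution",5)] := by decide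
  rw [hit] at hm
  fin_cases hm <;> decide

-- truthiness of 'topics & group': the intersection is nonempty iff some topic is in the group
lemma pv_hit_iff (t g : List String) :
    ((!(PySem.Set.inter (PySem.Set.ofList t) (PySem.Set.ofList g)).isEmpty) = true) ↔ ∃ x ∈ t, x ∈ g := by
  rw [Bool.not_eq_true']
  rw [← Bool.not_eq_true, List.isEmpty_iff]
  constructor
  · intro h
    by_contra hc
    push Not at hc
    apply h
    rw [List.eq_nil_iff_forall_not_mem]
    intro y hy
    rw [PySem.Set.mem_inter] at hy
    exact hc y (by simpa [PySem.Set.mem_ofList] using hy.1) (by simpa [PySem.Set.mem_ofList] using hy.2)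
  · rintro ⟨x, hx, hg⟩ hnil
    have : x ∈ PySem.Set.inter (PySem.Set.ofList t) (PySem.Set.ofList g) := by
      rw [PySem.Set.mem_inter]; exact ⟨by simpa [PySem.Set.mem_ofList], by simpa [PySem.Set.mem_ofList]⟩
    simp [hnil] at this

-- A returns true iff some group meets both topic lists
lemma pv_A_iff (t1 t2 : List String) :
    topics_are_related_py t1 t2 = true ↔
      ∃ k : Fin 6, (∃ x ∈ t1, x ∈ pvGroupsB[k.1]) ∧ (∃ y ∈ t2, y ∈ pvGroupsB[k.1]) := by
  show pvLoopA t1 t2 pvGroupsA = true ↔ _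
  simp only [pvGroupsA, pvLoopA, Bool.if_true_left, Bool.or_eq_true, Bool.and_eq_true,
    decide_eq_true_eq, pv_hit_iff]
  constructor
  · rintro (h | h | h | h | h | (h | hF))
    · exact ⟨0, by simpa [pvGroupsB] using h⟩
    · exact ⟨1, by simpa [pvGroupsB] using h⟩
    · exact ⟨2, by simpa [pvGroupsB] using h⟩
    · exact ⟨3, by simpa [pvGroupsB] using h⟩
    · exact ⟨4, by simpa [pvGroupsB] using h⟩
    · exact ⟨5, by simpa [pvGroupsB] using h⟩
    · simp at hF
  · rintro ⟨k, hk⟩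
    fin_cases k
    · exact Or.inl (by simpa [pvGroupsB] using hk)
    · exact Or.inr (Or.inl (by simpa [pvGroupsB] using hk))
    · exact Or.inr (Or.inr (Or.inl (by simpa [pvGroupsB] using hk)))
    · exact Or.inr (Or.inr (Or.inr (Or.inl (by simpa [pvGroupsB] using hk))))
    · exact Or.inr (Or.inr (Or.inr (Or.inr (Or.inl (by simpa [pvGroupsB] using hk)))))
    · exact Or.inr (Or.inr (Or.inr (Or.inr (Or.inr (Or.inl (by simpa [pvGroupsB] using hk))))))

-- B returns true iff some group id is hit by a topic of each list
lemma pv_B_iff (t1 t2 : List String) :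
    topics_are_related_py_alt t1 t2 = true ↔
      ∃ i : Int, (∃ x ∈ t1, pvIndexB.get? x = some i) ∧ (∃ y ∈ t2, pvIndexB.get? y = some i) := by
  show (!(PySem.Set.isdisjoint _ _)) = true ↔ _
  rw [Bool.not_eq_true', ← Bool.not_eq_true, PySem.Set.isdisjoint_iff]
  push Not
  constructor
  · rintro ⟨i, h1, h2⟩
    rw [PySem.Set.mem_ofList, List.mem_filterMap] at h1 h2
    obtain ⟨x, hx, hxl⟩ := h1
    obtain ⟨y, hy, hyl⟩ := h2
    exact ⟨i, ⟨x, hx, hxl⟩, ⟨y, hy, hyl⟩⟩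
  · rintro ⟨i, ⟨x, hx, hxl⟩, ⟨y, hy, hyl⟩⟩
    refine ⟨i, ?_, ?_⟩ <;> rw [PySem.Set.mem_ofList, List.mem_filterMap]
    · exact ⟨x, hx, hxl⟩
    · exact ⟨y, hy, hyl⟩

-- ===== VERDICT (by name: the statement is the Claim_ definition above) =====
theorem topics_are_related_py_spec : Claim_equal_topics_are_related_py := by
  intro t1 t2 _
  unfold Spec_topics_are_related_py
  rw [Bool.eq_iff_iff, pv_A_iff, pv_B_iff]
  constructor
  · rintro ⟨k, ⟨x, hx, hxg⟩, ⟨y, hy, hyg⟩⟩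
    exact ⟨(k.1 : Int), ⟨x, hx, pv_lookup_of_mem k x hxg⟩, ⟨y, hy, pv_lookup_of_mem k y hyg⟩⟩
  · rintro ⟨i, ⟨x, hx, hxl⟩, ⟨y, hy, hyl⟩⟩
    obtain ⟨k, rfl, hxg⟩ := pv_mem_of_lookup x i hxl
    obtain ⟨k', hk', hyg⟩ := pv_mem_of_lookup y _ hyl
    have : k' = k := by
      apply Fin.ext
      exact_mod_cast hk'.symm
    exact ⟨k, ⟨x, hx, hxg⟩, ⟨y, hy, this ▸ hyg⟩⟩
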